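-- pv_equiv track=rewrite | github.com/chrishayuk/chuk-code-raptor | src/chuk_code_raptor/chunking/parsers/rdf.py | _build_rss1_item_content
-- ===== SOURCE A (Python) =====
-- from typing import List, Optional, Dict, Any
--
-- def _build_rss1_item_content(item_data: Dict[str, Any]) -> List[str]:
--     """Build readable content from RSS 1.0 item data"""
--     content_parts = []
--
--     # Title
--     if item_data.get('title'):
--         content_parts.append(f"Title: {item_data['title']}")
--
--     # Author (from Dublin Core creator)
--     if item_data.get('dc_creator'):
--         content_parts.append(f"Creator: {item_data['dc_creator']}")
--     elif item_data.get('author'):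
--         content_parts.append(f"Author: {item_data['author']}")
--
--     # Publication date (from Dublin Core)
--     if item_data.get('dc_date'):
--         content_parts.append(f"Date: {item_data['dc_date']}")
--     elif item_data.get('pubDate'):
--         content_parts.append(f"Published: {item_data['pubDate']}")
--
--     # Subject/Topic (from Dublin Core)
--     if item_data.get('dc_subject'):
--         content_parts.append(f"Subject: {item_data['dc_subject']}")
--
--     # Description
--     if item_data.get('description'):
--         content_parts.append(f"Description: {item_data['description']}")
--
--     # Full content if available
--     if item_data.get('content_encoded'):
--         content_parts.append(f"Full Content: {item_data['content_encoded']}")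
--
--     # Link
--     if item_data.get('link'):
--         content_parts.append(f"Link: {item_data['link']}")
--
--     # RDF identifier
--     if item_data.get('about'):
--         content_parts.append(f"RDF Resource: {item_data['about']}")
--
--     # Additional Dublin Core metadata
--     dc_extras = [
--         ('dc_publisher', 'Publisher'),
--         ('dc_rights', 'Rights'),
--         ('dc_identifier', 'Identifier'),
--         ('dc_source', 'Source')
--     ]
--
--     for dc_key, dc_label in dc_extras:
--         if item_data.get(dc_key):
--             content_parts.append(f"{dc_label}: {item_data[dc_key]}")
--
--     return content_parts
-- ===== SOURCE B (Python) =====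
-- from typing import List, Dict, Any
--
-- # key -> (group, rank, label); lower rank wins within a group
-- _SLOT = {
--     'title': (0, 0, 'Title'),
--     'dc_creator': (1, 0, 'Creator'),
--     'author': (1, 1, 'Author'),
--     'dc_date': (2, 0, 'Date'),
--     'pubDate': (2, 1, 'Published'),
--     'dc_subject': (3, 0, 'Subject'),
--     'description': (4, 0, 'Description'),
--     'content_encoded': (5, 0, 'Full Content'),
--     'link': (6, 0, 'Link'),
--     'about': (7, 0, 'RDF Resource'),
--     'dc_publisher': (8, 0, 'Publisher'),
--     'dc_rights': (9, 0, 'Rights'),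
--     'dc_identifier': (10, 0, 'Identifier'),
--     'dc_source': (11, 0, 'Source'),
-- }
--
-- def _build_rss1_item_content(item_data: Dict[str, Any]) -> List[str]:
--     # One pass over the items: slot each recognized truthy field into its group,
--     # keeping the lowest-rank candidate; then emit the groups in order.
--     best = {}
--     for key, value in item_data.items():
--         slot = _SLOT.get(key)
--         if slot is None or not value:
--             continue
--         group, rank, label = slot
--         cur = best.get(group)
--         if cur is None or rank < cur[0]:
--             best[group] = (rank, label, value)
--     parts = []
--     for g in range(12):
--         if g in best:
--             _, label, value = best[g]
--             parts.append(f"{label}: {value}")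
--     return parts
-- ===== Notes on version B (the rewrite author's own statement) =====
-- stated objective: alternative
-- what changed: Inverts the traversal: instead of A's fixed sequence of per-field dict lookups (if/elif chain plus a dc_extras loop), B makes a single pass over the dict's items, slotting each recognized truthy field into its group via a key->(group,rank,label) index with lowest-rank preference, then emits the groups in order.
import Mathlib
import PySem

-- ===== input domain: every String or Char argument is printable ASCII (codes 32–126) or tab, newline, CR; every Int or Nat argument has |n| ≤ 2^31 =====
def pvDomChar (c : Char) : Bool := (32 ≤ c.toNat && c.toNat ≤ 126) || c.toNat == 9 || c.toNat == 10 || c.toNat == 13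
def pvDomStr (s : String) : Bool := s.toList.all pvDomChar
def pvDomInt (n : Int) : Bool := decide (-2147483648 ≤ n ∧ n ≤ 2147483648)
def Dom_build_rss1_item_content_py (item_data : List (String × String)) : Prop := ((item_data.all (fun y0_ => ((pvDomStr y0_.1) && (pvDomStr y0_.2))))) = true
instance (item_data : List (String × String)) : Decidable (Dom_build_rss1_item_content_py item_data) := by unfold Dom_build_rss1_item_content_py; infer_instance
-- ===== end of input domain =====

-- B inverts the traversal: one pass over the dict's items slots each recognized truthy field
-- into its group (lowest rank wins), then the groups are emitted in order; objective: alternative.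

-- dict.get(k): first match in the association list (insertion order)
def pvGet (d : List (String × String)) (k : String) : Option String :=
  (d.find? (fun p => p.1 == k)).map (·.2)

-- Python truthiness of an optional string: present and nonempty
def pvTruthy (o : Option String) : Bool :=
  match o with
  | none => false
  | some s => !(s == "")

-- item_data[k] inside a branch where the key was found truthy
def pvVal (d : List (String × String)) (k : String) : String :=
  (pvGet d k).getD ""

-- ===== PORT A =====
def build_rss1_item_content_py (item_data : List (String × String)) : List String :=
  let cp : List String := []
  let cp := if pvTruthy (pvGet item_data "title") then cp ++ ["Title: " ++ pvVal item_data "title"] else cp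
  let cp := if pvTruthy (pvGet item_data "dc_creator") then cp ++ ["Creator: " ++ pvVal item_data "dc_creator"]
            else if pvTruthy (pvGet item_data "author") then cp ++ ["Author: " ++ pvVal item_data "author"] else cp
  let cp := if pvTruthy (pvGet item_data "dc_date") then cp ++ ["Date: " ++ pvVal item_data "dc_date"]
            else if pvTruthy (pvGet item_data "pubDate") then cp ++ ["Published: " ++ pvVal item_data "pubDate"] else cp
  let cp := if pvTruthy (pvGet item_data "dc_subject") then cp ++ ["Subject: " ++ pvVal item_data "dc_subject"] else cp
  let cp := if pvTruthy (pvGet item_data "description") then cp ++ ["Description: " ++ pvVal item_data "description"] else cp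
  let cp := if pvTruthy (pvGet item_data "content_encoded") then cp ++ ["Full Content: " ++ pvVal item_data "content_encoded"] else cp
  let cp := if pvTruthy (pvGet item_data "link") then cp ++ ["Link: " ++ pvVal item_data "link"] else cp
  let cp := if pvTruthy (pvGet item_data "about") then cp ++ ["RDF Resource: " ++ pvVal item_data "about"] else cp
  let dc_extras : List (String × String) :=
    [("dc_publisher", "Publisher"), ("dc_rights", "Rights"),
     ("dc_identifier", "Identifier"), ("dc_source", "Source")]
  dc_extras.foldl
    (fun cp p => if pvTruthy (pvGet item_data p.1) then cp ++ [p.2 ++ ": " ++ pvVal item_data p.1] else cp)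
    cp

-- ===== PORT B =====
-- the _SLOT dict constant: key -> (group, rank, label)
def pvSlotTable : List (String × (Int × Int × String)) :=
  [("title", (0, 0, "Title")),
   ("dc_creator", (1, 0, "Creator")),
   ("author", (1, 1, "Author")),
   ("dc_date", (2, 0, "Date")),
   ("pubDate", (2, 1, "Published")),
   ("dc_subject", (3, 0, "Subject")),
   ("description", (4, 0, "Description")),
   ("content_encoded", (5, 0, "Full Content")),
   ("link", (6, 0, "Link")),
   ("about", (7, 0, "RDF Resource")),
   ("dc_publisher", (8, 0, "Publisher")),
   ("dc_rights", (9, 0, "Rights")),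
   ("dc_identifier", (10, 0, "Identifier")),
   ("dc_source", (11, 0, "Source"))]

-- _SLOT.get(key)
def pvSlot (k : String) : Option (Int × Int × String) :=
  (pvSlotTable.find? (fun p => p.1 == k)).map (·.2)

-- loop body: slot one (key, value) item into `best`
def pvStep (best : PySem.Dict Int (Int × String × String)) (kv : String × String) :
    PySem.Dict Int (Int × String × String) :=
  match pvSlot kv.1 with
  | none => best
  | some (g, r, l) =>
    if kv.2 == "" then best
    else
      match best.get? g with
      | none => best.insert g (r, l, kv.2)
      | some cur => if r < cur.1 then best.insert g (r, l, kv.2) else best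

def build_rss1_item_content_py_alt (item_data : List (String × String)) : List String :=
  let best := item_data.foldl pvStep PySem.Dict.empty
  (PySem.List.pyRange 0 12 1).foldl
    (fun parts g =>
      match best.get? g with
      | none => parts
      | some c => parts ++ [c.2.1 ++ ": " ++ c.2.2]) []

-- ===== PRECONDITION & SPEC =====
-- Pre_ excludes association lists with duplicate keys: A's parameter is a Python dict, whose
-- keys are unique, so a duplicate-key list represents no input of A and its first-vs-last
-- lookup behaviour on the list encoding is accidental.
def Pre_build_rss1_item_content_py (item_data : List (String × String)) : Prop :=
  (item_data.map Prod.fst).Nodup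
instance (item_data : List (String × String)) : Decidable (Pre_build_rss1_item_content_py item_data) := by unfold Pre_build_rss1_item_content_py; infer_instance

def pvWitness_build_rss1_item_content_py : (List (String × String)) :=
  [("title", "A Post"), ("author", "Ann"), ("link", "http://x"), ("dc_rights", "CC")]

def Spec_build_rss1_item_content_py (item_data : List (String × String)) (out : List String) : Prop := out = build_rss1_item_content_py_alt item_data
instance (item_data : List (String × String)) (out : List String) : Decidable (Spec_build_rss1_item_content_py item_data out) := by unfold Spec_build_rss1_item_content_py; infer_instance

-- ===== CLAIM (what is proved, stated in full; the proofs are below) =====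
def Claim_equal_build_rss1_item_content_py : Prop := ∀ (item_data : List (String × String)), Dom_build_rss1_item_content_py item_data → Pre_build_rss1_item_content_py item_data → Spec_build_rss1_item_content_py item_data (build_rss1_item_content_py item_data)

-- ===== LEMMAS AND PROOFS =====

-- per-group contribution of one item
def pvCand (g : Int) (kv : String × String) : Option (Int × String × String) :=
  match pvSlot kv.1 with
  | none => none
  | some (g', r, l) =>
    if kv.2 == "" then none
    else if g' == g then some (r, l, kv.2) else none

-- left-biased preference by rank
def pvMerge (a b : Option (Int × String × String)) : Option (Int × String × String) :=
  match a, b with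
  | none, b => b
  | some a, none => some a
  | some a, some b => if b.1 < a.1 then some b else some a

-- the fold's effect on one group
def pvM (g : Int) (d : List (String × String)) : Option (Int × String × String) :=
  d.foldl (fun acc kv => pvMerge acc (pvCand g kv)) none

theorem pvMerge_none_right (a : Option (Int × String × String)) : pvMerge a none = a := by
  cases a <;> rfl

theorem pvMerge_assoc (a b c : Option (Int × String × String)) :
    pvMerge (pvMerge a b) c = pvMerge a (pvMerge b c) := by
  rcases a with _ | a
  · rfl
  · rcases b with _ | b
    · rfl
    · rcases c with _ | c
      · exact pvMerge_none_right _
      · show pvMerge (if b.1 < a.1 then some b else some a) (some c) =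
             pvMerge (some a) (if c.1 < b.1 then some c else some b)
        by_cases h1 : b.1 < a.1
        · rw [if_pos h1]
          by_cases h2 : c.1 < b.1
          · rw [if_pos h2]
            show (if c.1 < b.1 then some c else some b) = (if c.1 < a.1 then some c else some a)
            rw [if_pos h2, if_pos (show c.1 < a.1 by omega)]
          · rw [if_neg h2]
            show (if c.1 < b.1 then some c else some b) = (if b.1 < a.1 then some b else some a)
            rw [if_neg h2, if_pos h1]
        · rw [if_neg h1]
          by_cases h2 : c.1 < b.1
          · rw [if_pos h2]
          · rw [if_neg h2]
            show (if c.1 < a.1 then some c else some a) = (if b.1 < a.1 then some b else some a)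
            rw [if_neg (show ¬ c.1 < a.1 by omega), if_neg h1]

theorem pvFoldM (g : Int) (d : List (String × String)) (a : Option (Int × String × String)) :
    d.foldl (fun acc kv => pvMerge acc (pvCand g kv)) a = pvMerge a (pvM g d) := by
  induction d generalizing a with
  | nil => simp [pvM, pvMerge_none_right]
  | cons kv rest ih =>
    simp only [pvM, List.foldl_cons] at *
    rw [ih, ih (pvMerge none (pvCand g kv)), ← pvMerge_assoc]
    rfl

theorem pvM_cons (g : Int) (kv : String × String) (rest : List (String × String)) :
    pvM g (kv :: rest) = pvMerge (pvCand g kv) (pvM g rest) := by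
  rw [pvM, List.foldl_cons, pvFoldM]
  rfl

theorem pvGet_step (best : PySem.Dict Int (Int × String × String)) (kv : String × String) (g : Int) :
    (pvStep best kv).get? g = pvMerge (best.get? g) (pvCand g kv) := by
  unfold pvStep pvCand
  cases hs : pvSlot kv.1 with
  | none => exact (pvMerge_none_right _).symm
  | some v =>
    obtain ⟨g', r, l⟩ := v
    by_cases hv : kv.2 == ""
    · simp [hv, pvMerge_none_right]
    · simp only [hv]
      by_cases hg : g' == g
      · have hg' : g' = g := by simpa using hg
        subst hg'
        cases hb : best.get? g' with
        | none => simp [pvMerge]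
        | some cur =>
          by_cases hr : r < cur.1
          · simp [hr, pvMerge]
          · simp [hr, hb, pvMerge]
      · have hg' : g' ≠ g := by simpa using hg
        cases hb : best.get? g' with
        | none => simp [hg, PySem.Dict.get?_insert, hg'.symm, pvMerge_none_right]
        | some cur =>
          by_cases hr : r < cur.1
          · simp [hg, hr, PySem.Dict.get?_insert, hg'.symm, pvMerge_none_right]
          · simp [hg, hr, pvMerge_none_right]

theorem pvGet_fold (d : List (String × String)) (best : PySem.Dict Int (Int × String × String)) (g : Int) :
    (d.foldl pvStep best).get? g = pvMerge (best.get? g) (pvM g d) := by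
  induction d generalizing best with
  | nil => simp [pvM, pvMerge_none_right]
  | cons kv rest ih =>
    simp only [List.foldl_cons]
    rw [ih, pvGet_step, pvM_cons, ← pvMerge_assoc]

-- inverse characterisation of the slot table lookup
theorem pvSlot_mem (s : String) (v : Int × Int × String) (h : pvSlot s = some v) :
    (s, v) ∈ pvSlotTable := by
  unfold pvSlot at h
  cases hf : pvSlotTable.find? (fun p => p.1 == s) with
  | none => rw [hf] at h; simp at h
  | some p =>
    rw [hf] at h
    have hp := List.find?_some hf
    have hm := List.mem_of_find?_eq_some hf
    simp at h hp
    have : p = (s, v) := by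
      obtain ⟨p1, p2⟩ := p
      simp_all
    rwa [this] at hm

theorem pvCand_none (g : Int) (kv : String × String)
    (h : ∀ p ∈ pvSlotTable, p.2.1 = g → kv.1 ≠ p.1) : pvCand g kv = none := by
  unfold pvCand
  cases hs : pvSlot kv.1 with
  | none => rfl
  | some v =>
    obtain ⟨g', r, l⟩ := v
    by_cases hv : kv.2 == ""
    · simp [hv]
    · simp only [hv]
      have hmem := pvSlot_mem _ _ hs
      by_cases hg : g' = g
      · exact absurd rfl (h _ hmem (by simpa using hg))
      · simp [hg]

theorem pvM_none (g : Int) (d : List (String × String))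
    (h : ∀ kv ∈ d, pvCand g kv = none) : pvM g d = none := by
  induction d with
  | nil => rfl
  | cons kv rest ih =>
    rw [pvM, List.foldl_cons, pvFoldM, h kv (by simp)]
    exact ih fun x hx => h x (by simp [hx])

-- every candidate rank in the table is nonnegative
theorem pvTable_rank_nonneg : ∀ p ∈ pvSlotTable, 0 ≤ p.2.2.1 := by decide

theorem pvCand_rank_nonneg (g : Int) (kv : String × String) (c : Int × String × String)
    (h : pvCand g kv = some c) : 0 ≤ c.1 := by
  unfold pvCand at h
  cases hs : pvSlot kv.1 with
  | none => rw [hs] at h; simp at h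
  | some v =>
    obtain ⟨g', r, l⟩ := v
    rw [hs] at h
    simp only at h
    have hr : 0 ≤ r := by simpa using pvTable_rank_nonneg _ (pvSlot_mem _ _ hs)
    by_cases hv : (kv.2 == "") = true
    · rw [if_pos hv] at h; exact absurd h (by simp)
    · rw [if_neg hv] at h
      by_cases hg : (g' == g) = true
      · rw [if_pos hg] at h
        cases h
        exact hr
      · rw [if_neg hg] at h; exact absurd h (by simp)

theorem pvM_rank_nonneg (g : Int) (d : List (String × String)) (c : Int × String × String)
    (h : pvM g d = some c) : 0 ≤ c.1 := by
  induction d generalizing c with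
  | nil => simp [pvM] at h
  | cons kv rest ih =>
    rw [pvM, List.foldl_cons, pvFoldM] at h
    cases hc : pvCand g kv with
    | none => rw [hc] at h; simp [pvMerge] at h; exact ih c h
    | some c0 =>
      rw [hc] at h
      cases hm : pvM g rest with
      | none =>
        rw [hm] at h; simp [pvMerge] at h
        exact h ▸ pvCand_rank_nonneg g kv c0 hc
      | some c1 =>
        rw [hm] at h; simp only [pvMerge] at h
        split_ifs at h <;> simp at h
        · exact h ▸ ih c1 hm
        · exact h ▸ pvCand_rank_nonneg g kv c0 hc

theorem pvMerge_zero_left (g : Int) (l v : String) (d : List (String × String)) :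
    pvMerge (some (0, l, v)) (pvM g d) = some (0, l, v) := by
  cases hm : pvM g d with
  | none => rfl
  | some c =>
    have := pvM_rank_nonneg g d c hm
    simp only [pvMerge]
    split_ifs with h
    · omega
    · rfl

theorem pvGet_cons (a : String × String) (t : List (String × String)) (k : String) :
    pvGet (a :: t) k = if a.1 == k then some a.2 else pvGet t k := by
  unfold pvGet
  rw [List.find?_cons]
  cases h : (a.1 == k)
  · simp
  · simp

theorem pvGet_not_mem (d : List (String × String)) (k : String)
    (h : k ∉ d.map Prod.fst) : pvGet d k = none := by
  simp only [pvGet, Option.map_eq_none_iff]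
  rw [List.find?_eq_none]
  intro p hp
  simp only [beq_iff_eq]
  intro he
  exact h (he ▸ List.mem_map_of_mem hp)

-- the one-pass fold computes, per group, exactly A's first-truthy chain
theorem pvM_single (g : Int) (k l : String)
    (hwit : pvSlot k = some (g, 0, l))
    (honly : ∀ p ∈ pvSlotTable, p.2.1 = g → p = (k, g, 0, l)) :
    ∀ d : List (String × String), (d.map Prod.fst).Nodup →
      pvM g d = if pvTruthy (pvGet d k) then some (0, l, pvVal d k) else none := by
  intro d hnd
  induction d with
  | nil => simp [pvM, pvGet, pvTruthy]
  | cons kv rest ih =>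
    simp only [List.map_cons, List.nodup_cons] at hnd
    obtain ⟨hknotin, hndrest⟩ := hnd
    rw [pvM_cons]
    by_cases hk : kv.1 = k
    · have hbt : (kv.1 == k) = true := by simpa using hk
      have hget : pvGet (kv :: rest) k = some kv.2 := by rw [pvGet_cons, hbt]; rfl
      have hrestnone : pvM g rest = none := by
        apply pvM_none
        intro kv' hkv'
        apply pvCand_none
        intro p hp hpg hkeq
        have hpk := honly p hp hpg
        subst hpk
        apply hknotin
        rw [hk]
        exact List.mem_map.mpr ⟨kv', hkv', by simpa using hkeq⟩
      rw [hrestnone, pvMerge_none_right]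
      by_cases hv : (kv.2 == "") = true
      · have hcand : pvCand g kv = none := by unfold pvCand; rw [hk, hwit]; simp [hv]
        have htv : pvTruthy (pvGet (kv :: rest) k) = false := by
          rw [hget]; show (!(kv.2 == "")) = false; simp [hv]
        simp [hcand, htv]
      · have hcand : pvCand g kv = some (0, l, kv.2) := by unfold pvCand; rw [hk, hwit]; simp [hv]
        have htv : pvTruthy (pvGet (kv :: rest) k) = true := by
          rw [hget]; show (!(kv.2 == "")) = true; simp [hv]
        have hvv : pvVal (kv :: rest) k = kv.2 := by unfold pvVal; rw [hget]; rfl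
        simp [hcand, htv, hvv]
    · have hbf : (kv.1 == k) = false := by simpa using hk
      have hcg : pvGet (kv :: rest) k = pvGet rest k := by rw [pvGet_cons, hbf]; rfl
      have hcv : pvVal (kv :: rest) k = pvVal rest k := by unfold pvVal; rw [hcg]
      have hcand : pvCand g kv = none := by
        apply pvCand_none
        intro p hp hpg
        have hpk := honly p hp hpg
        subst hpk
        simpa using hk
      rw [hcand, hcg, hcv]
      exact ih hndrest

theorem pvM_pair (g : Int) (k1 l1 k2 l2 : String)
    (h1 : pvSlot k1 = some (g, 0, l1)) (h2 : pvSlot k2 = some (g, 1, l2)) (hne : k1 ≠ k2)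
    (honly : ∀ p ∈ pvSlotTable, p.2.1 = g → p = (k1, g, 0, l1) ∨ p = (k2, g, 1, l2)) :
    ∀ d : List (String × String), (d.map Prod.fst).Nodup →
      pvM g d = if pvTruthy (pvGet d k1) then some (0, l1, pvVal d k1)
                else if pvTruthy (pvGet d k2) then some (1, l2, pvVal d k2) else none := by
  intro d hnd
  induction d with
  | nil => simp [pvM, pvGet, pvTruthy]
  | cons kv rest ih =>
    simp only [List.map_cons, List.nodup_cons] at hnd
    obtain ⟨hknotin, hndrest⟩ := hnd
    rw [pvM_cons]
    by_cases hk1 : kv.1 = k1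
    · have hbt1 : (kv.1 == k1) = true := by simpa using hk1
      have hbf2 : (kv.1 == k2) = false := by simp [hk1]; exact hne
      have hget1 : pvGet (kv :: rest) k1 = some kv.2 := by rw [pvGet_cons, hbt1]; rfl
      have hcg2 : pvGet (kv :: rest) k2 = pvGet rest k2 := by rw [pvGet_cons, hbf2]; rfl
      have hvv2 : pvVal (kv :: rest) k2 = pvVal rest k2 := by unfold pvVal; rw [hcg2]
      have hrest1 : pvGet rest k1 = none :=
        pvGet_not_mem rest k1 (fun hm => hknotin (hk1 ▸ hm))
      by_cases hv : (kv.2 == "") = true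
      · have hcand : pvCand g kv = none := by unfold pvCand; rw [hk1, h1]; simp [hv]
        have htv : pvTruthy (pvGet (kv :: rest) k1) = false := by
          rw [hget1]; show (!(kv.2 == "")) = false; simp [hv]
        rw [hcand, htv]
        simp only [Bool.false_eq_true, if_false, hcg2, hvv2]
        have hlhs : pvMerge none (pvM g rest) = pvM g rest := rfl
        rw [hlhs, ih hndrest, hrest1]
        simp [pvTruthy]
      · have hcand : pvCand g kv = some (0, l1, kv.2) := by unfold pvCand; rw [hk1, h1]; simp [hv]
        have htv : pvTruthy (pvGet (kv :: rest) k1) = true := by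
          rw [hget1]; show (!(kv.2 == "")) = true; simp [hv]
        have hvv1 : pvVal (kv :: rest) k1 = kv.2 := by unfold pvVal; rw [hget1]; rfl
        rw [hcand, pvMerge_zero_left, htv]
        simp [hvv1]
    · by_cases hk2 : kv.1 = k2
      · have hbt2 : (kv.1 == k2) = true := by simpa using hk2
        have hbf1 : (kv.1 == k1) = false := by simpa using hk1
        have hget2 : pvGet (kv :: rest) k2 = some kv.2 := by rw [pvGet_cons, hbt2]; rfl
        have hcg1 : pvGet (kv :: rest) k1 = pvGet rest k1 := by rw [pvGet_cons, hbf1]; rfl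
        have hvv1 : pvVal (kv :: rest) k1 = pvVal rest k1 := by unfold pvVal; rw [hcg1]
        have hvv2 : pvVal (kv :: rest) k2 = kv.2 := by unfold pvVal; rw [hget2]; rfl
        have hrest2 : pvGet rest k2 = none :=
          pvGet_not_mem rest k2 (fun hm => hknotin (hk2 ▸ hm))
        by_cases hv : (kv.2 == "") = true
        · have hcand : pvCand g kv = none := by unfold pvCand; rw [hk2, h2]; simp [hv]
          have htv : pvTruthy (pvGet (kv :: rest) k2) = false := by
            rw [hget2]; show (!(kv.2 == "")) = false; simp [hv]
          rw [hcand, htv]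
          have hlhs : pvMerge none (pvM g rest) = pvM g rest := rfl
          rw [hlhs, ih hndrest, hcg1, hvv1, hrest2]
          simp [pvTruthy]
        · have hcand : pvCand g kv = some (1, l2, kv.2) := by unfold pvCand; rw [hk2, h2]; simp [hv]
          have htv : pvTruthy (pvGet (kv :: rest) k2) = true := by
            rw [hget2]; show (!(kv.2 == "")) = true; simp [hv]
          rw [hcand, ih hndrest, hcg1, hvv1, htv, hrest2]
          by_cases ht1 : pvTruthy (pvGet rest k1) = true
          · rw [ht1]
            simp [pvMerge]
          · simp only [ht1, Bool.false_eq_true, if_false]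
            simp [pvTruthy, pvMerge, hvv2]
      · have hbf1 : (kv.1 == k1) = false := by simpa using hk1
        have hbf2 : (kv.1 == k2) = false := by simpa using hk2
        have hcg1 : pvGet (kv :: rest) k1 = pvGet rest k1 := by rw [pvGet_cons, hbf1]; rfl
        have hcg2 : pvGet (kv :: rest) k2 = pvGet rest k2 := by rw [pvGet_cons, hbf2]; rfl
        have hvv1 : pvVal (kv :: rest) k1 = pvVal rest k1 := by unfold pvVal; rw [hcg1]
        have hvv2 : pvVal (kv :: rest) k2 = pvVal rest k2 := by unfold pvVal; rw [hcg2]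
        have hcand : pvCand g kv = none := by
          apply pvCand_none
          intro p hp hpg
          rcases honly p hp hpg with hpk | hpk <;> subst hpk
          · simpa using hk1
          · simpa using hk2
        rw [hcand, hcg1, hcg2, hvv1, hvv2]
        exact ih hndrest

-- emission of one group slot
def pvEmit (x : Option (Int × String × String)) : List String :=
  match x with
  | none => []
  | some c => [c.2.1 ++ ": " ++ c.2.2]

theorem pvStep_emit (p : List String) (x : Option (Int × String × String)) :
    (match x with
     | none => p
     | some c => p ++ [c.2.1 ++ ": " ++ c.2.2]) = p ++ pvEmit x := by
  cases x <;> simp [pvEmit]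

theorem pvEmit_if1 (c : Bool) (l v : String) (r : Int) :
    pvEmit (if c then some (r, l, v) else none) = if c then [l ++ ": " ++ v] else [] := by
  cases c <;> rfl

theorem pvEmit_if2 (c1 c2 : Bool) (l1 v1 l2 v2 : String) (r1 r2 : Int) :
    pvEmit (if c1 then some (r1, l1, v1) else if c2 then some (r2, l2, v2) else none) =
      if c1 then [l1 ++ ": " ++ v1] else if c2 then [l2 ++ ": " ++ v2] else [] := by
  cases c1 <;> cases c2 <;> rfl

theorem pv_if_pad (c : Bool) (p t : List String) :
    (if c = true then p ++ t else p) = p ++ (if c = true then t else []) := by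
  cases c <;> simp

theorem pv_if_pull (c : Bool) (p t e : List String) :
    (if c = true then p ++ t else p ++ e) = p ++ (if c = true then t else e) := by
  cases c <;> simp

-- ===== VERDICT (by name: the statement is the Claim_ definition above) =====
theorem build_rss1_item_content_py_spec : Claim_equal_build_rss1_item_content_py := by
  intro d _ hpre
  show build_rss1_item_content_py d = build_rss1_item_content_py_alt d
  have hrange : PySem.List.pyRange 0 12 1 = [0, 1, 2, 3, 4, 5, 6, 7, 8, 9, 10, 11] := by decide
  have hget : ∀ g : Int, (d.foldl pvStep PySem.Dict.empty).get? g = pvM g d := by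
    intro g; rw [pvGet_fold]; simp [pvMerge]
  have e0 := pvM_single 0 "title" "Title" (by rfl) (by decide) d hpre
  have e1 := pvM_pair 1 "dc_creator" "Creator" "author" "Author" (by rfl) (by rfl) (by decide) (by decide) d hpre
  have e2 := pvM_pair 2 "dc_date" "Date" "pubDate" "Published" (by rfl) (by rfl) (by decide) (by decide) d hpre
  have e3 := pvM_single 3 "dc_subject" "Subject" (by rfl) (by decide) d hpre
  have e4 := pvM_single 4 "description" "Description" (by rfl) (by decide) d hpre
  have e5 := pvM_single 5 "content_encoded" "Full Content" (by rfl) (by decide) d hpre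
  have e6 := pvM_single 6 "link" "Link" (by rfl) (by decide) d hpre
  have e7 := pvM_single 7 "about" "RDF Resource" (by rfl) (by decide) d hpre
  have e8 := pvM_single 8 "dc_publisher" "Publisher" (by rfl) (by decide) d hpre
  have e9 := pvM_single 9 "dc_rights" "Rights" (by rfl) (by decide) d hpre
  have e10 := pvM_single 10 "dc_identifier" "Identifier" (by rfl) (by decide) d hpre
  have e11 := pvM_single 11 "dc_source" "Source" (by rfl) (by decide) d hpre
  simp only [build_rss1_item_content_py_alt, hrange, List.foldl_cons, List.foldl_nil,
    pvStep_emit, hget, e0, e1, e2, e3, e4, e5, e6, e7, e8, e9, e10, e11,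
    pvEmit_if1, pvEmit_if2]
  simp only [build_rss1_item_content_py, List.foldl_cons, List.foldl_nil,
    pv_if_pad, pv_if_pull, List.append_assoc, List.nil_append]
  simp only [
    show "Title" ++ ": " = "Title: " from rfl,
    show "Creator" ++ ": " = "Creator: " from rfl,
    show "Author" ++ ": " = "Author: " from rfl,
    show "Date" ++ ": " = "Date: " from rfl,
    show "Published" ++ ": " = "Published: " from rfl,
    show "Subject" ++ ": " = "Subject: " from rfl,
    show "Description" ++ ": " = "Description: " from rfl,
    show "Full Content" ++ ": " = "Full Content: " from rfl,
    show "Link" ++ ": " = "Link: " from rfl,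
    show "RDF Resource" ++ ": " = "RDF Resource: " from rfl]
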